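-- pv_equiv track=rewrite | github.com/Ja-efan/CodingTest | Programmers/prgms_lv0_120846.py | solution
-- ===== SOURCE A (Python) =====
-- def solution(n:int) -> int:
--     # 약수의 개수가 3개 이상이려면 최소 4부터 시작해야 한다.
--     answer = 0
--     for i in range(4, n+1) :
--         count = 0
--         for j in range(1, i+1):
--             if i % j == 0:
--                 count += 1
--         if count >= 3 :
--             answer += 1
--
--     return answer
-- ===== SOURCE B (Python) =====
-- def solution(n: int) -> int:
--     # A number has 3+ divisors iff it is composite; test by trial division up to sqrt(i).
--     def is_composite(i):
--         j = 2
--         while j * j <= i: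
--             if i % j == 0:
--                 return True
--             j += 1
--         return False
--
--     return sum(1 for i in range(4, n + 1) if is_composite(i))
-- ===== Notes on version B (the rewrite author's own statement) =====
-- stated objective: faster
-- what changed: Instead of counting all divisors of each i with a full inner scan and checking the count is >= 3, B tests each i for compositeness by trial division up to sqrt(i) with early exit and counts the composites.
import Mathlib
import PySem

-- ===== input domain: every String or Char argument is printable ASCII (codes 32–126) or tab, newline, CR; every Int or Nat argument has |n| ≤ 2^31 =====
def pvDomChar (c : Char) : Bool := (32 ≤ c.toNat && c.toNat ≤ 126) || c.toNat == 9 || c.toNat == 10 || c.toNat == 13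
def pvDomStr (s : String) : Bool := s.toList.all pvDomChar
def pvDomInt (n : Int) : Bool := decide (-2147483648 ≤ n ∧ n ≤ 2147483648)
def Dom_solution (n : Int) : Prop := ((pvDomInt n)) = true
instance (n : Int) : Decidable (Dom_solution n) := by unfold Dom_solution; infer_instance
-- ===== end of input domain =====

-- B replaces A's full divisor count per i by a sqrt-bounded trial-division compositeness test.

-- ===== PORT A =====
def solution (n : Int) : Int :=
  (PySem.List.pyRange 4 (n + 1) 1).foldl
    (fun answer i =>
      let count :=
        (PySem.List.pyRange 1 (i + 1) 1).foldl
          (fun c j => if PySem.Int.mod i j == 0 then c + 1 else c) (0 : Int)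
      if 3 ≤ count then answer + 1 else answer)
    0

-- ===== PORT B =====
-- 'j = 2; while j * j <= i: if i % j == 0: return True; j += 1; return False'
-- (fuel only bounds the loop so the recursion is structural; i.toNat steps always suffice)
def isCompositeFrom (i : Int) : Nat → Int → Bool
  | 0, _ => false
  | fuel + 1, j =>
    if j * j ≤ i then
      if PySem.Int.mod i j == 0 then true else isCompositeFrom i fuel (j + 1)
    else false

def isComposite (i : Int) : Bool := isCompositeFrom i i.toNat 2

def solution_alt (n : Int) : Int :=
  (PySem.List.pyRange 4 (n + 1) 1).foldl
    (fun a i => if isComposite i then a + 1 else a) 0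

-- ===== PRECONDITION & SPEC =====
def Spec_solution (n : Int) (out : Int) : Prop := out = solution_alt n
instance (n : Int) (out : Int) : Decidable (Spec_solution n out) := by unfold Spec_solution; infer_instance

-- ===== CLAIM (what is proved, stated in full; the proofs are below) =====
def Claim_equal_solution : Prop := ∀ (n : Int), Dom_solution n → Spec_solution n (solution n)

-- ===== LEMMAS AND PROOFS =====

-- B's loop finds a divisor d ≥ j with d*d ≤ i (for 2 ≤ j and enough fuel)
lemma isCompositeFrom_iff (i : Int) : ∀ (fuel : Nat) (j : Int), 2 ≤ j →
    (i + 1 - j).toNat < fuel →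
    (isCompositeFrom i fuel j = true ↔ ∃ d : Int, j ≤ d ∧ d * d ≤ i ∧ d ∣ i) := by
  intro fuel
  induction fuel with
  | zero => intro j hj hf; omega
  | succ fuel ih =>
    intro j hj hf
    rw [isCompositeFrom]
    by_cases h : j * j ≤ i
    · have hji : j ≤ j * j := by nlinarith [mul_self_nonneg (j - 1)]
      rw [if_pos h]
      by_cases hm : PySem.Int.mod i j == 0
      · rw [if_pos hm]
        simp only [true_iff]
        exact ⟨j, le_refl j, h, (PySem.Int.mod_eq_zero_iff_dvd i j).1 (by simpa using hm)⟩
      · rw [if_neg hm, ih (j + 1) (by omega) (by omega)]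
        constructor
        · rintro ⟨d, hd1, hd2, hd3⟩; exact ⟨d, by omega, hd2, hd3⟩
        · rintro ⟨d, hd1, hd2, hd3⟩
          refine ⟨d, ?_, hd2, hd3⟩
          rcases eq_or_lt_of_le hd1 with rfl | h2
          · exact absurd ((PySem.Int.mod_eq_zero_iff_dvd i j).2 hd3) (by simpa using hm)
          · omega
    · rw [if_neg h]
      simp only [Bool.false_eq_true, false_iff]
      rintro ⟨d, hd1, hd2, hd3⟩
      have h1 : j * j ≤ d * d := mul_le_mul hd1 hd1 (by omega) (by omega)
      omega

-- a proper divisor in (1, i) exists iff one with d*d ≤ i exists (pair d with i/d)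
lemma divisor_bridge (i : Int) (hi : 4 ≤ i) :
    (∃ d : Int, 2 ≤ d ∧ d ≤ i - 1 ∧ d ∣ i) ↔
      ∃ d : Int, 2 ≤ d ∧ d * d ≤ i ∧ d ∣ i := by
  constructor
  · rintro ⟨d, hd1, hd2, hd3⟩
    by_cases h : d * d ≤ i
    · exact ⟨d, hd1, h, hd3⟩
    · push Not at h
      set e : Int := i / d with he_def
      have he : e * d = i := Int.ediv_mul_cancel hd3
      have hd0 : (0:Int) < d := by omega
      have helt : e < d := by nlinarith
      have he2 : 2 ≤ e := by nlinarith
      refine ⟨e, he2, by nlinarith, ⟨d, he.symm⟩⟩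
  · rintro ⟨d, hd1, hd2, hd3⟩
    have : 2 * d ≤ d * d := by nlinarith
    exact ⟨d, hd1, by omega, hd3⟩

-- A's inner count is ≥ 3 iff i (≥ 4) has a divisor strictly between 1 and i
lemma count_ge_three_iff (i : Int) (hi : 4 ≤ i) :
    (3 ≤ ((PySem.List.pyRange 1 (i + 1) 1).countP
        (fun j => PySem.Int.mod i j == 0) : Int)) ↔
      ∃ d : Int, 2 ≤ d ∧ d ≤ i - 1 ∧ d ∣ i := by
  set L := PySem.List.pyRange 1 (i + 1) 1 with hL
  set p : Int → Bool := fun j => PySem.Int.mod i j == 0 with hp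
  have hnd : (L.filter p).Nodup := (PySem.List.nodup_pyRange_one 1 (i+1)).filter p
  have hcard : (L.filter p).toFinset.card = (L.filter p).length := List.toFinset_card_of_nodup hnd
  have hmem : ∀ x : Int, x ∈ (L.filter p).toFinset ↔ 1 ≤ x ∧ x ≤ i ∧ x ∣ i := by
    intro x
    rw [List.mem_toFinset, List.mem_filter, hL, PySem.List.mem_pyRange_one, hp]
    simp only [beq_iff_eq, PySem.Int.mod_eq_zero_iff_dvd]
    exact ⟨fun ⟨⟨a,b⟩,c⟩ => ⟨a, by omega, c⟩, fun ⟨a,b,c⟩ => ⟨⟨a, by omega⟩, c⟩⟩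
  have hcast : ((3:Int) ≤ (L.countP p : Int)) ↔ 3 ≤ L.countP p := by exact_mod_cast Iff.rfl
  rw [hcast, List.countP_eq_length_filter, ← hcard]
  constructor
  · intro h3
    by_contra hno
    push Not at hno
    have hsub : (L.filter p).toFinset ⊆ ({1, i} : Finset ℤ) := by
      intro x hx
      rcases (hmem x).1 hx with ⟨h1, h2, h3d⟩
      simp only [Finset.mem_insert, Finset.mem_singleton]
      by_contra hxx
      push Not at hxx
      exact hno x (by omega) (by omega) h3d
    have h1 := Finset.card_le_card hsub
    have h2 : ({1, i} : Finset ℤ).card ≤ 2 := (Finset.card_insert_le _ _).trans (by simp)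
    omega
  · rintro ⟨d, hd1, hd2, hd3⟩
    have hsub : ({1, d, i} : Finset ℤ) ⊆ (L.filter p).toFinset := by
      intro x hx
      simp only [Finset.mem_insert, Finset.mem_singleton] at hx
      rcases hx with h | h | h
      · rw [h]; exact (hmem 1).2 ⟨le_refl 1, by omega, one_dvd i⟩
      · rw [h]; exact (hmem d).2 ⟨by omega, by omega, hd3⟩
      · rw [h]; exact (hmem i).2 ⟨by omega, le_refl i, dvd_refl i⟩
    have hc : ({1, d, i} : Finset ℤ).card = 3 :=
      Finset.card_eq_three.mpr ⟨1, d, i, by omega, by omega, by omega, rfl⟩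
    have h1 := Finset.card_le_card hsub
    omega

-- ===== VERDICT (by name: the statement is the Claim_ definition above) =====
theorem solution_spec : Claim_equal_solution := by
  intro n _
  unfold Spec_solution solution solution_alt
  apply PySem.List.foldl_congr_mem
  intro acc i hi
  have hi4 : 4 ≤ i := ((PySem.List.mem_pyRange_one).1 hi).1
  simp only [PySem.List.foldl_if_add_one, zero_add]
  have hiff : (3 ≤ ((PySem.List.pyRange 1 (i + 1) 1).countP
      (fun j => PySem.Int.mod i j == 0) : Int)) ↔ isComposite i = true := by
    rw [count_ge_three_iff i hi4, divisor_bridge i hi4, isComposite,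
      isCompositeFrom_iff i i.toNat 2 (le_refl 2) (by omega)]
  by_cases hc : isComposite i = true
  · rw [if_pos (hiff.2 hc), if_pos hc]
  · rw [if_neg (fun h => hc (hiff.1 h)), if_neg hc]
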